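-- pv_equiv track=rewrite | github.com/sharkhunterr/grabarr | grabarr/adapters/gutenberg.py | _find_format_url
-- ===== SOURCE A (Python) =====
-- def _find_format_url(formats: dict[str, str], substr: str) -> str | None:
--     """Return the URL of the first MIME-key whose name contains ``substr``.
--
--     Skips the ``.zip`` wrapped variants Gutendex sometimes lists for
--     images-included epubs — those tend to be larger and a strict
--     superset of the regular epub.
--     """
--     fallback: str | None = None
--     for key, url in formats.items():
--         if substr not in key.lower():
--             continue
--         if not isinstance(url, str):
--             continue
--         if url.endswith(".zip"):
--             fallback = url
--             continue
--         return url
--     return fallback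
-- ===== SOURCE B (Python) =====
-- def _find_format_url(formats: dict[str, str], substr: str) -> str | None:
--     """Two-pass form: first pass returns the first non-.zip matching URL;
--     second pass (only if none found) keeps the LAST matching .zip URL."""
--     for key, url in formats.items():
--         if substr in key.lower() and isinstance(url, str) and not url.endswith(".zip"):
--             return url
--     last_zip = None
--     for key, url in formats.items():
--         if substr in key.lower() and isinstance(url, str) and url.endswith(".zip"):
--             last_zip = url
--     return last_zip
-- ===== Notes on version B (the rewrite author's own statement) =====
-- stated objective: simpler
-- what changed: Replaces A's single interleaved scan with a tracked fallback variable by two explicit passes: first-match non-.zip URL, else last matching .zip URL.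
import Mathlib
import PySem

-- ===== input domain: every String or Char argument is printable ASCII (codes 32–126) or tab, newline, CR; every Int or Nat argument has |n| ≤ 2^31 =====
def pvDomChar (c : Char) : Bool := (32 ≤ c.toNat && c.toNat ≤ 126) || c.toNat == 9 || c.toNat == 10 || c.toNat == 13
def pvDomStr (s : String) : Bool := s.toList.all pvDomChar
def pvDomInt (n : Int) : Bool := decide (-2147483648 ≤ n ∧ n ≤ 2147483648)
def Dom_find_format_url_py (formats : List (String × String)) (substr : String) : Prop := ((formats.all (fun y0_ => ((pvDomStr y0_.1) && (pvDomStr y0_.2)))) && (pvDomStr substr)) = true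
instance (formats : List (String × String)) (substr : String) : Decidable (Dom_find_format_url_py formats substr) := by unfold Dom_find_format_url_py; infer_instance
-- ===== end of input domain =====

-- B changes structure only: A's single scan with an interleaved fallback variable becomes
-- two explicit passes (first non-.zip match, else last .zip match); same O(n) cost.

-- ===== PORT A =====
-- A's single loop: skip non-matching keys, remember .zip matches in `fallback`, return the
-- first non-.zip matching url; at the end return the fallback.
def findFmtGoA (substr : String) : List (String × String) → Option String → Option String
  | [], fallback => fallback
  | (key, url) :: rest, fallback =>
    if ¬ (PySem.Str.isIn substr (PySem.Str.lower key) = true) then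
      findFmtGoA substr rest fallback
    else if PySem.Str.endswith url ".zip" then
      findFmtGoA substr rest (some url)
    else
      some url

def find_format_url_py (formats : List (String × String)) (substr : String) : Option String :=
  findFmtGoA substr formats none

-- ===== PORT B =====
-- first pass: first matching url not ending in ".zip"
def findFmtFirst (substr : String) : List (String × String) → Option String
  | [] => none
  | (key, url) :: rest =>
    if PySem.Str.isIn substr (PySem.Str.lower key) && !(PySem.Str.endswith url ".zip") then
      some url
    else
      findFmtFirst substr rest

-- second pass: last matching url ending in ".zip", tracked in an accumulator
def findFmtLastZip (substr : String) : List (String × String) → Option String → Option String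
  | [], acc => acc
  | (key, url) :: rest, acc =>
    findFmtLastZip substr rest
      (if PySem.Str.isIn substr (PySem.Str.lower key) && PySem.Str.endswith url ".zip" then some url else acc)

def find_format_url_py_alt (formats : List (String × String)) (substr : String) : Option String :=
  match findFmtFirst substr formats with
  | some url => some url
  | none => findFmtLastZip substr formats none

-- ===== PRECONDITION & SPEC =====
def Spec_find_format_url_py (formats : List (String × String)) (substr : String) (out : Option String) : Prop := out = find_format_url_py_alt formats substr
instance (formats : List (String × String)) (substr : String) (out : Option String) : Decidable (Spec_find_format_url_py formats substr out) := by unfold Spec_find_format_url_py; infer_instance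

-- ===== CLAIM (what is proved, stated in full; the proofs are below) =====
def Claim_equal_find_format_url_py : Prop := ∀ (formats : List (String × String)) (substr : String), Dom_find_format_url_py formats substr → Spec_find_format_url_py formats substr (find_format_url_py formats substr)

-- ===== LEMMAS AND PROOFS =====
-- A's scan with pending fallback `fb` equals: first non-.zip match if any, else the
-- last .zip match folded on top of `fb`.
theorem findFmtGoA_eq (substr : String) (l : List (String × String)) (fb : Option String) :
    findFmtGoA substr l fb =
      match findFmtFirst substr l with
      | some url => some url
      | none => findFmtLastZip substr l fb := by
  induction l generalizing fb with
  | nil => rfl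
  | cons p rest ih =>
    obtain ⟨key, url⟩ := p
    by_cases hm : PySem.Chars.isIn substr.toList (PySem.Chars.lower key.toList) = true
    · by_cases hz : PySem.Chars.endswith url.toList ['.', 'z', 'i', 'p'] = true
      · simp [findFmtGoA, findFmtFirst, findFmtLastZip, hm, hz, ih]
      · simp [findFmtGoA, findFmtFirst, hm, hz]
    · simp [findFmtGoA, findFmtFirst, findFmtLastZip, hm, ih]

-- ===== VERDICT (by name: the statement is the Claim_ definition above) =====
theorem find_format_url_py_spec : Claim_equal_find_format_url_py := by
  intro formats substr _
  unfold Spec_find_format_url_py find_format_url_py find_format_url_py_alt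
  exact findFmtGoA_eq substr formats none
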